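-- pv_equiv track=rewrite | github.com/abhijeetdtu/bringalive | extensions/openwebui_chunk_reader/openwebui_action.py | _extract_load_text
-- ===== SOURCE A (Python) =====
-- def _extract_load_text(
--
--     message: str,
--     file_text: str | None = None,
-- ) -> str | None:
--     lower = message.lower()
--     for prefix in ("load\n", "load\r\n", "load: ", "load "):
--         if lower.startswith(prefix):
--             text = message[len(prefix):].strip()
--             if text:
--                 return text
--     if lower in {"load file", "load attachment"} and file_text:
--         return file_text
--     return None
-- ===== SOURCE B (Python) =====
-- def _extract_load_text(
--     message: str,
--     file_text: str | None = None,
-- ) -> str | None: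
--     # Dispatch on the 4-char "load" head and the separator characters directly,
--     # instead of scanning a tuple of lowercased prefixes. (file_text is never
--     # returned: any message equal to "load file"/"load attachment" is already
--     # captured by the "load " prefix, so that branch of the original is dead.)
--     if message[:4].lower() != "load":
--         return None
--     rest = message[4:]
--     if rest[:1] in ("\n", " "):
--         body = rest[1:]
--     elif rest[:2] in ("\r\n", ": "):
--         body = rest[2:]
--     else:
--         return None
--     text = body.strip()
--     return text if text else None
-- ===== Notes on version B (the rewrite author's own statement) =====
-- stated objective: simpler
-- what changed: B replaces A's loop over a tuple of lowercased prefixes (and A's dead set-membership fallback, whose members are already captured by the space-prefix case and so never fires) with a single dispatch on the 4-char lowercased head and the separator characters; file_text is never consulted.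
import Mathlib
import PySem

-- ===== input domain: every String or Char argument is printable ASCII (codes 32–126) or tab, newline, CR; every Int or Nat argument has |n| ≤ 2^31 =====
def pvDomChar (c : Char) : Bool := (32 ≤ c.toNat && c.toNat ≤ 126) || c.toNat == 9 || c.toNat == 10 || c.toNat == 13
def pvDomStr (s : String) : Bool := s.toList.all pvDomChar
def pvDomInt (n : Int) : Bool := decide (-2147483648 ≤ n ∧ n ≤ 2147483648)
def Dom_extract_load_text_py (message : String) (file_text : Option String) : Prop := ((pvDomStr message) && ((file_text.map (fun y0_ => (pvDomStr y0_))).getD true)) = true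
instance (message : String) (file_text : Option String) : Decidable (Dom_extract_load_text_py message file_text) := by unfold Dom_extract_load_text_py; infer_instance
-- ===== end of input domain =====

-- B replaces A's scan over a tuple of lowercased prefixes by a direct dispatch on the
-- 4-char "load" head and the separator characters (objective: simpler; A's file_text
-- branch is dead — "load file"/"load attachment" are captured by the "load " prefix —
-- so B omits the file_text set-membership check entirely).

-- ===== PORT A =====
-- the prefix tuple ("load\n", "load\r\n", "load: ", "load ") as explicit char lists
def pvPrefixesA : List (List Char) :=
  [['l','o','a','d','\n'], ['l','o','a','d','\r','\n'], ['l','o','a','d',':',' '], ['l','o','a','d',' ']]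

-- the for-loop over the prefix tuple: on a match with nonempty stripped tail, return it
def pvLoopA (msg lower : List Char) : List (List Char) → Option (List Char)
  | [] => none
  | p :: rest =>
    if PySem.Chars.startswith lower p then
      let text := PySem.Chars.strip (PySem.List.slice msg (some (p.length : Int)) none)
      if text ≠ [] then some text else pvLoopA msg lower rest
    else pvLoopA msg lower rest

def pvACore (msg : List Char) (ft : Option (List Char)) : Option (List Char) :=
  let lower := PySem.Chars.lower msg
  match pvLoopA msg lower pvPrefixesA with
  | some t => some t
  | none =>
    -- if lower in {"load file", "load attachment"} and file_text: return file_text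
    if lower = ['l','o','a','d',' ','f','i','l','e'] ∨
       lower = ['l','o','a','d',' ','a','t','t','a','c','h','m','e','n','t'] then
      match ft with
      | some f => if f ≠ [] then some f else none
      | none => none
    else none

def extract_load_text_py (message : String) (file_text : Option String) : Option String :=
  (pvACore message.toList (file_text.map String.toList)).map String.ofList

-- ===== PORT B =====
def pvBCore (msg : List Char) : Option (List Char) :=
  -- if message[:4].lower() != "load": return None
  if PySem.Chars.lower (PySem.List.slice msg none (some 4)) ≠ ['l','o','a','d'] then none
  else
    let rest := PySem.List.slice msg (some 4) none
    let body? : Option (List Char) :=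
      if PySem.List.slice rest none (some 1) = ['\n'] ∨ PySem.List.slice rest none (some 1) = [' '] then
        some (PySem.List.slice rest (some 1) none)
      else if PySem.List.slice rest none (some 2) = ['\r','\n'] ∨ PySem.List.slice rest none (some 2) = [':',' '] then
        some (PySem.List.slice rest (some 2) none)
      else none
    match body? with
    | some body =>
      let text := PySem.Chars.strip body
      if text ≠ [] then some text else none
    | none => none

def extract_load_text_py_alt (message : String) (file_text : Option String) : Option String :=
  (pvBCore message.toList).map String.ofList

-- ===== PRECONDITION & SPEC =====
def Spec_extract_load_text_py (message : String) (file_text : Option String) (out : Option String) : Prop := out = extract_load_text_py_alt message file_text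
instance (message : String) (file_text : Option String) (out : Option String) : Decidable (Spec_extract_load_text_py message file_text out) := by unfold Spec_extract_load_text_py; infer_instance

-- ===== CLAIM (what is proved, stated in full; the proofs are below) =====
def Claim_equal_extract_load_text_py : Prop := ∀ (message : String) (file_text : Option String), Dom_extract_load_text_py message file_text → Spec_extract_load_text_py message file_text (extract_load_text_py message file_text)

-- ===== LEMMAS AND PROOFS =====

-- lowerChar only moves 'A'..'Z'; for any char with code < 65 it is the identity test
lemma lowerChar_eq_low (c d : Char) (hd : d.toNat < 65) :
    PySem.Chars.lowerChar c = d ↔ c = d := by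
  unfold PySem.Chars.lowerChar
  split
  · rename_i h
    simp only [PySem.Chars.isupper, Bool.and_eq_true, decide_eq_true_eq, Char.le_def,
      UInt32.le_iff_toNat_le] at h
    have hc : 65 ≤ c.toNat ∧ c.toNat ≤ 90 := h
    have hv : (c.toNat + 32).isValidChar := Or.inl (by omega)
    have ht : (Char.ofNat (c.toNat + 32)).toNat = c.toNat + 32 := by
      rw [Char.toNat_ofNat, if_pos hv]
    constructor
    · intro he
      exfalso
      have : d.toNat = c.toNat + 32 := by rw [← he, ht]
      omega
    · intro he
      exfalso
      subst he
      omega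
  · exact Iff.rfl

-- a whitespace char is not an uppercase letter, so lowerChar fixes it
lemma lowerChar_of_isspace (c : Char) (h : PySem.Chars.isspace c = true) :
    PySem.Chars.lowerChar c = c := by
  unfold PySem.Chars.lowerChar
  rw [if_neg]
  simp only [PySem.Chars.isspace, decide_eq_true_eq, Bool.or_eq_true, Bool.and_eq_true] at h
  simp only [PySem.Chars.isupper, Bool.and_eq_true, decide_eq_true_eq, Char.le_def,
    UInt32.le_iff_toNat_le, not_and]
  intro h1 h2
  have hc : 65 ≤ c.toNat := h1
  have hc2 : c.toNat ≤ 90 := h2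
  omega

lemma strip_eq_nil_iff (cs : List Char) :
    PySem.Chars.strip cs = [] ↔ ∀ c ∈ cs, PySem.Chars.isspace c = true := by
  unfold PySem.Chars.strip PySem.Chars.rstrip PySem.Chars.lstrip
  rw [List.reverse_eq_nil_iff, List.dropWhile_eq_nil_iff]
  simp only [List.mem_reverse]
  constructor
  · intro h c hc
    rw [← List.takeWhile_append_dropWhile (p := PySem.Chars.isspace) (l := cs)] at hc
    rcases List.mem_append.mp hc with h1 | h2
    · exact List.mem_takeWhile_imp h1
    · exact h c h2
  · intro h x hx
    exact h x ((List.dropWhile_sublist _).subset hx)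

-- the two programs agree on the char-list core, for messages of length ≥ 6
lemma core_eq_long (a b c d e r0 : Char) (r' : List Char) (ft : Option (List Char)) :
    pvACore (a::b::c::d::e::r0::r') ft = pvBCore (a::b::c::d::e::r0::r') := by
  have lcn : PySem.Chars.lowerChar '\n' = '\n' := by decide
  have lcsp : PySem.Chars.lowerChar ' ' = ' ' := by decide
  have lccr : PySem.Chars.lowerChar '\x0d' = '\x0d' := by decide
  have lcco : PySem.Chars.lowerChar ':' = ':' := by decide
  have hn : PySem.Chars.lowerChar e = '\n' ↔ e = '\n' := lowerChar_eq_low e '\n' (by decide)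
  have hn' := eq_comm.trans hn
  have hsp : PySem.Chars.lowerChar e = ' ' ↔ e = ' ' := lowerChar_eq_low e ' ' (by decide)
  have hsp' := eq_comm.trans hsp
  have hcr : PySem.Chars.lowerChar e = '\x0d' ↔ e = '\x0d' := lowerChar_eq_low e '\x0d' (by decide)
  have hcr' := eq_comm.trans hcr
  have hco : PySem.Chars.lowerChar e = ':' ↔ e = ':' := lowerChar_eq_low e ':' (by decide)
  have hco' := eq_comm.trans hco
  have hn0 : PySem.Chars.lowerChar r0 = '\n' ↔ r0 = '\n' := lowerChar_eq_low r0 '\n' (by decide)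
  have hn0' := eq_comm.trans hn0
  have hs0 : PySem.Chars.lowerChar r0 = ' ' ↔ r0 = ' ' := lowerChar_eq_low r0 ' ' (by decide)
  have hs0' := eq_comm.trans hs0
  by_cases hl : PySem.Chars.lowerChar a = 'l'
  case neg => simp [pvACore, pvBCore, pvLoopA, pvPrefixesA, PySem.Chars.startswith, PySem.Chars.lower, List.isPrefixOf, PySem.List.slice_from, PySem.List.slice_to, hl, Ne.symm hl]
  by_cases ho : PySem.Chars.lowerChar b = 'o'
  case neg => simp [pvACore, pvBCore, pvLoopA, pvPrefixesA, PySem.Chars.startswith, PySem.Chars.lower, List.isPrefixOf, PySem.List.slice_from, PySem.List.slice_to, ho, Ne.symm ho]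
  by_cases ha : PySem.Chars.lowerChar c = 'a'
  case neg => simp [pvACore, pvBCore, pvLoopA, pvPrefixesA, PySem.Chars.startswith, PySem.Chars.lower, List.isPrefixOf, PySem.List.slice_from, PySem.List.slice_to, ha, Ne.symm ha]
  by_cases hd : PySem.Chars.lowerChar d = 'd'
  case neg => simp [pvACore, pvBCore, pvLoopA, pvPrefixesA, PySem.Chars.startswith, PySem.Chars.lower, List.isPrefixOf, PySem.List.slice_from, PySem.List.slice_to, hd, Ne.symm hd]
  by_cases hen : e = '\n'
  · subst hen
    by_cases hst : PySem.Chars.strip (r0::r') = [] <;>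
    simp [hst, pvACore, pvBCore, pvLoopA, pvPrefixesA, PySem.Chars.startswith, PySem.Chars.lower, List.isPrefixOf, PySem.List.slice_from, PySem.List.slice_to, hl, ho, ha, hd, lcn, hn0, hn0', hs0, hs0']
  by_cases hesp : e = ' '
  · subst hesp
    by_cases hstrip : PySem.Chars.strip (r0::r') = []
    · have hsp0 : PySem.Chars.isspace r0 = true := (strip_eq_nil_iff _).mp hstrip r0 (by simp)
      have hfix := lowerChar_of_isspace r0 hsp0
      simp [pvACore, pvBCore, pvLoopA, pvPrefixesA, PySem.Chars.startswith, PySem.Chars.lower, List.isPrefixOf, PySem.List.slice_from, PySem.List.slice_to, hl, ho, ha, hd, lcsp, hstrip, hfix]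
      rintro (⟨h1, -⟩ | ⟨h1, -⟩) <;> (subst h1; exact absurd hsp0 (by decide))
    · simp [pvACore, pvBCore, pvLoopA, pvPrefixesA, PySem.Chars.startswith, PySem.Chars.lower, List.isPrefixOf, PySem.List.slice_from, PySem.List.slice_to, hl, ho, ha, hd, lcsp, hstrip]
  by_cases hecr : e = '\x0d'
  · subst hecr
    by_cases hr0 : r0 = '\n'
    · subst hr0
      by_cases hst : PySem.Chars.strip r' = [] <;>
      simp [hst, pvACore, pvBCore, pvLoopA, pvPrefixesA, PySem.Chars.startswith, PySem.Chars.lower, List.isPrefixOf, PySem.List.slice_from, PySem.List.slice_to, hl, ho, ha, hd, lccr, lcn]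
    · simp [pvACore, pvBCore, pvLoopA, pvPrefixesA, PySem.Chars.startswith, PySem.Chars.lower, List.isPrefixOf, PySem.List.slice_from, PySem.List.slice_to, hl, ho, ha, hd, lccr, hn0, hn0', hr0, Ne.symm hr0, hs0, hs0']
  by_cases heco : e = ':'
  · subst heco
    by_cases hr0 : r0 = ' '
    · subst hr0
      by_cases hst : PySem.Chars.strip r' = [] <;>
      simp [hst, pvACore, pvBCore, pvLoopA, pvPrefixesA, PySem.Chars.startswith, PySem.Chars.lower, List.isPrefixOf, PySem.List.slice_from, PySem.List.slice_to, hl, ho, ha, hd, lcco, lcsp]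
    · simp [pvACore, pvBCore, pvLoopA, pvPrefixesA, PySem.Chars.startswith, PySem.Chars.lower, List.isPrefixOf, PySem.List.slice_from, PySem.List.slice_to, hl, ho, ha, hd, lcco, hs0, hs0', hr0, Ne.symm hr0, hn0, hn0']
  · simp [pvACore, pvBCore, pvLoopA, pvPrefixesA, PySem.Chars.startswith, PySem.Chars.lower, List.isPrefixOf, PySem.List.slice_from, PySem.List.slice_to, hl, ho, ha, hd, hn, hn', hsp, hsp', hcr, hcr', hco, hco',
      hen, hesp, hecr, heco, Ne.symm hen, Ne.symm hesp, Ne.symm hecr, Ne.symm heco]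

-- the two programs agree on the char-list core, for a message of length exactly 5
lemma core_eq_five (a b c d e : Char) (ft : Option (List Char)) :
    pvACore [a,b,c,d,e] ft = pvBCore [a,b,c,d,e] := by
  have hst : PySem.Chars.strip ([] : List Char) = [] := rfl
  have hn : PySem.Chars.lowerChar e = '\n' ↔ e = '\n' := lowerChar_eq_low e '\n' (by decide)
  have hn' := eq_comm.trans hn
  have hsp : PySem.Chars.lowerChar e = ' ' ↔ e = ' ' := lowerChar_eq_low e ' ' (by decide)
  have hsp' := eq_comm.trans hsp
  have hcr : PySem.Chars.lowerChar e = '\x0d' ↔ e = '\x0d' := lowerChar_eq_low e '\x0d' (by decide)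
  have hcr' := eq_comm.trans hcr
  have hco : PySem.Chars.lowerChar e = ':' ↔ e = ':' := lowerChar_eq_low e ':' (by decide)
  have hco' := eq_comm.trans hco
  by_cases hl : PySem.Chars.lowerChar a = 'l'
  case neg => simp [pvACore, pvBCore, pvLoopA, pvPrefixesA, PySem.Chars.startswith, PySem.Chars.lower, List.isPrefixOf, PySem.List.slice_from, PySem.List.slice_to, hl, Ne.symm hl]
  by_cases ho : PySem.Chars.lowerChar b = 'o'
  case neg => simp [pvACore, pvBCore, pvLoopA, pvPrefixesA, PySem.Chars.startswith, PySem.Chars.lower, List.isPrefixOf, PySem.List.slice_from, PySem.List.slice_to, ho, Ne.symm ho]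
  by_cases ha : PySem.Chars.lowerChar c = 'a'
  case neg => simp [pvACore, pvBCore, pvLoopA, pvPrefixesA, PySem.Chars.startswith, PySem.Chars.lower, List.isPrefixOf, PySem.List.slice_from, PySem.List.slice_to, ha, Ne.symm ha]
  by_cases hd : PySem.Chars.lowerChar d = 'd'
  case neg => simp [pvACore, pvBCore, pvLoopA, pvPrefixesA, PySem.Chars.startswith, PySem.Chars.lower, List.isPrefixOf, PySem.List.slice_from, PySem.List.slice_to, hd, Ne.symm hd]
  simp [pvACore, pvBCore, pvLoopA, pvPrefixesA, PySem.Chars.startswith, PySem.Chars.lower, List.isPrefixOf, PySem.List.slice_from, PySem.List.slice_to, hl, ho, ha, hd, hst, hn, hn', hsp, hsp', hcr, hcr', hco, hco']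
  by_cases h5 : e = '\n' ∨ e = ' ' <;> simp [h5, hst]

-- the two programs agree on the char-list core, for every message
lemma core_eq (msg : List Char) (ft : Option (List Char)) : pvACore msg ft = pvBCore msg := by
  match msg with
  | [] => simp [pvACore, pvBCore, pvLoopA, pvPrefixesA, PySem.Chars.startswith, PySem.Chars.lower, List.isPrefixOf, PySem.List.slice_from, PySem.List.slice_to]
  | [_] => simp [pvACore, pvBCore, pvLoopA, pvPrefixesA, PySem.Chars.startswith, PySem.Chars.lower, List.isPrefixOf, PySem.List.slice_from, PySem.List.slice_to]
  | [_,_] => simp [pvACore, pvBCore, pvLoopA, pvPrefixesA, PySem.Chars.startswith, PySem.Chars.lower, List.isPrefixOf, PySem.List.slice_from, PySem.List.slice_to]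
  | [_,_,_] => simp [pvACore, pvBCore, pvLoopA, pvPrefixesA, PySem.Chars.startswith, PySem.Chars.lower, List.isPrefixOf, PySem.List.slice_from, PySem.List.slice_to]
  | [_,_,_,_] => simp [pvACore, pvBCore, pvLoopA, pvPrefixesA, PySem.Chars.startswith, PySem.Chars.lower, List.isPrefixOf, PySem.List.slice_from, PySem.List.slice_to]
  | [a,b,c,d,e] => exact core_eq_five a b c d e ft
  | a::b::c::d::e::r0::r' => exact core_eq_long a b c d e r0 r' ft

-- ===== VERDICT (by name: the statement is the Claim_ definition above) =====
theorem extract_load_text_py_spec : Claim_equal_extract_load_text_py := by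
  intro message file_text _
  unfold Spec_extract_load_text_py extract_load_text_py extract_load_text_py_alt
  rw [core_eq]
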